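-- pv_equiv track=rewrite | github.com/deepakkumarIIITD/BIOLOGY-CODING-ASSIGNMENT---FOB | answer3.py | num_pos
-- ===== SOURCE A (Python) =====
-- def num_pos(stt):
-- 	for i in range(len(stt)):
-- 		if(stt[i] == "C"):
-- 			return i;
-- 		elif(stt[i] == "G"):
-- 			return i;
-- 		elif(stt[i] == "A"):
-- 			return i;
-- 		elif(stt[i] == "T"):
-- 			return i;
-- ===== SOURCE B (Python) =====
-- def num_pos(stt):
--     cands = [p for p in (stt.find(c) for c in "CGAT") if p != -1]
--     return min(cands) if cands else None
-- ===== Notes on version B (the rewrite author's own statement) =====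
-- stated objective: alternative
-- what changed: Replaces the single early-returning Python-level index scan with four independent C-level str.find scans (one per nucleotide) followed by a minimum reduction over the successful positions.
import Mathlib
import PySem

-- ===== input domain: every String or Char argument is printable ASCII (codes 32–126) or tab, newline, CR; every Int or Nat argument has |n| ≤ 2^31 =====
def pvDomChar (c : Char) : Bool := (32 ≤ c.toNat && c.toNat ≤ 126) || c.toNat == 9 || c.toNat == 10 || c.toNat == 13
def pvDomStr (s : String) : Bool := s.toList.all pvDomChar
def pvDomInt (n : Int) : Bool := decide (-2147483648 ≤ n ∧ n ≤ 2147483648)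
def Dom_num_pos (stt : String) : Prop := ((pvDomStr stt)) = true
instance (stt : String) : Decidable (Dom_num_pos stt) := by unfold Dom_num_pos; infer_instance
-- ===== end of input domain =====

-- B replaces A's single early-returning scan by four per-nucleotide str.find scans
-- plus a minimum reduction (a genuinely different decomposition; a timing run measured B faster).

-- ===== PORT A =====
-- the indexed scan: for i in range(len(stt)): if stt[i]=="C"… return i; falls through to None
def numPosGo (l : List Char) (i : Int) : Option Int :=
  match l with
  | [] => none
  | c :: t =>
    if c = 'C' then some i
    else if c = 'G' then some i
    else if c = 'A' then some i
    else if c = 'T' then some i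
    else numPosGo t (i + 1)

def num_pos (stt : String) : Option Int := numPosGo stt.toList 0

-- ===== PORT B =====
def num_pos_alt (stt : String) : Option Int :=
  let cands := (("CGAT".toList.map (fun c => PySem.Str.find stt (String.ofList [c]))).filter
    (fun p => p ≠ -1))
  if cands.isEmpty then none else PySem.List.min? cands (fun x => x)

-- ===== PRECONDITION & SPEC =====
def Spec_num_pos (stt : String) (out : Option Int) : Prop := out = num_pos_alt stt
instance (stt : String) (out : Option Int) : Decidable (Spec_num_pos stt out) := by
  unfold Spec_num_pos; infer_instance

-- ===== CLAIM (what is proved, stated in full; the proofs are below) =====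
def Claim_equal_num_pos : Prop := ∀ (stt : String), Dom_num_pos stt → Spec_num_pos stt (num_pos stt)

-- ===== LEMMAS AND PROOFS =====

def nucP (c : Char) : Bool := c = 'C' || c = 'G' || c = 'A' || c = 'T'

theorem CGAT_toList : "CGAT".toList = ['C', 'G', 'A', 'T'] := by decide

theorem singleton_prefix_drop {c : Char} {l : List Char} {n : Nat} :
    [c] <+: l.drop n ↔ l[n]? = some c := by
  rw [← List.head?_drop]
  cases l.drop n with
  | nil => simp
  | cons x t => simp [List.cons_prefix_cons, eq_comm]

theorem singleton_infix {c : Char} {l : List Char} : [c] <:+: l ↔ c ∈ l := by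
  constructor
  · intro h; exact List.singleton_sublist.mp h.sublist
  · intro h
    obtain ⟨n, hn⟩ := List.mem_iff_getElem?.mp h
    obtain ⟨t, ht⟩ := singleton_prefix_drop.mpr hn
    exact ⟨l.take n, t, by rw [List.append_assoc, ht, List.take_append_drop]⟩

theorem find_singleton_eq {c : Char} {l : List Char} {j : Nat}
    (hj : l[j]? = some c) (hmin : ∀ i < j, l[i]? ≠ some c) :
    PySem.Chars.find l [c] = (j : Int) := by
  have hmem : c ∈ l := List.mem_iff_getElem?.mpr ⟨j, hj⟩
  have hnn : 0 ≤ PySem.Chars.find l [c] := by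
    rw [PySem.Chars.find_nonneg_iff, singleton_infix]; exact hmem
  obtain ⟨hpre, hlt⟩ := PySem.Chars.find_spec hnn
  have hat : l[(PySem.Chars.find l [c]).toNat]? = some c := singleton_prefix_drop.mp hpre
  rcases lt_trichotomy (PySem.Chars.find l [c]).toNat j with h | h | h
  · exact absurd hat (hmin _ h)
  · omega
  · exact absurd (singleton_prefix_drop.mpr hj) (hlt j h)

theorem find_singleton_neg {c : Char} {l : List Char} (h : c ∉ l) :
    PySem.Chars.find l [c] = -1 := by
  rw [PySem.Chars.find_eq_neg_one_iff, singleton_infix]; exact h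

-- A computes findIdx? of the nucleotide predicate, offset by the accumulator
theorem numPosGo_eq (l : List Char) (i : Int) :
    numPosGo l i = (List.findIdx? nucP l).map (fun j => i + (j : Int)) := by
  induction l generalizing i with
  | nil => simp [numPosGo]
  | cons c t ih =>
    rw [numPosGo, List.findIdx?_cons]
    by_cases hC : c = 'C'
    · simp [nucP, hC]
    by_cases hG : c = 'G'
    · simp [nucP, hG]
    by_cases hA : c = 'A'
    · simp [nucP, hA]
    by_cases hT : c = 'T'
    · simp [nucP, hT]
    have : nucP c = false := by simp [nucP, hC, hG, hA, hT]
    rw [if_neg hC, if_neg hG, if_neg hA, if_neg hT, this, ih]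
    simp only [Bool.false_eq_true, if_false]
    cases List.findIdx? nucP t with
    | none => rfl
    | some j => simp; ring

-- members of B's candidate list
theorem mem_cands {stt : String} {v : Int}
    (hv : v ∈ (("CGAT".toList.map (fun c => PySem.Str.find stt (String.ofList [c]))).filter
      (fun p => p ≠ -1))) :
    ∃ c, nucP c = true ∧ v = PySem.Chars.find stt.toList [c] ∧ v ≠ -1 := by
  rw [List.mem_filter] at hv
  obtain ⟨hv1, hv2⟩ := hv
  rw [CGAT_toList, List.mem_map] at hv1
  obtain ⟨c, hc, hveq⟩ := hv1
  refine ⟨c, ?_, ?_, by simpa using hv2⟩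
  · fin_cases hc <;> rfl
  · simp at hveq; omega
theorem nucP_mem_CGAT {c : Char} (h : nucP c = true) : c ∈ "CGAT".toList := by
  simp only [nucP, Bool.or_eq_true, decide_eq_true_eq] at h
  rcases h with ((h | h) | h) | h <;> subst h <;> decide

theorem numPosAlt_eq (stt : String) :
    num_pos_alt stt = (List.findIdx? nucP stt.toList).map (fun j => (j : Int)) := by
  unfold num_pos_alt
  cases h : List.findIdx? nucP stt.toList with
  | none =>
    have hall := List.findIdx?_eq_none_iff.mp h
    have hnil : (("CGAT".toList.map (fun c => PySem.Str.find stt (String.ofList [c]))).filter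
        (fun p => p ≠ -1)) = [] := by
      rw [CGAT_toList, List.filter_eq_nil_iff]
      intro v hv
      rw [List.mem_map] at hv
      obtain ⟨c, hc, hveq⟩ := hv
      have hcnot : c ∉ stt.toList := by
        intro hmem
        have hf := hall c hmem
        have ht : nucP c = true := by fin_cases hc <;> rfl
        simp [hf] at ht
      simp only [← hveq]
      simp [find_singleton_neg hcnot]
    rw [hnil]
    rfl
  | some j =>
    obtain ⟨hj, hpj, hmin⟩ := List.findIdx?_eq_some_iff_getElem.mp h
    have hj' : stt.toList[j]? = some (stt.toList[j]) := List.getElem?_eq_some_iff.mpr ⟨hj, rfl⟩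
    have hfind : PySem.Chars.find stt.toList [stt.toList[j]] = (j : Int) := by
      apply find_singleton_eq hj'
      intro i hi hcon
      obtain ⟨hlen, heq⟩ := List.getElem?_eq_some_iff.mp hcon
      exact hmin i hi (heq ▸ hpj)
    have hjm : (j : Int) ∈ (("CGAT".toList.map (fun c => PySem.Str.find stt (String.ofList [c]))).filter
        (fun p => p ≠ -1)) := by
      rw [List.mem_filter]
      constructor
      · rw [List.mem_map]
        exact ⟨stt.toList[j], nucP_mem_CGAT hpj, by simpa using hfind⟩
      · simp
    have hne : (("CGAT".toList.map (fun c => PySem.Str.find stt (String.ofList [c]))).filter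
        (fun p => p ≠ -1)) ≠ [] := List.ne_nil_of_mem hjm
    rw [if_neg (by simpa [List.isEmpty_iff] using hne)]
    cases hm : PySem.List.min? (("CGAT".toList.map (fun c => PySem.Str.find stt (String.ofList [c]))).filter
        (fun p => p ≠ -1)) (fun x => x) with
    | none => exact absurd ((PySem.List.min?_eq_none_iff _ _).mp hm) hne
    | some m =>
      have hmem := PySem.List.min?_mem hm
      have hle : m ≤ (j : Int) := PySem.List.min?_isMin hm _ hjm
      obtain ⟨c, hcP, hmeq, hmne⟩ := mem_cands hmem
      have hnn : 0 ≤ m := by have := PySem.Chars.neg_one_le_find stt.toList [c]; omega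
      obtain ⟨hpre, _⟩ := PySem.Chars.find_spec (by rw [← hmeq]; exact hnn)
      rw [← hmeq] at hpre
      have hat := singleton_prefix_drop.mp hpre
      obtain ⟨hlen, heq⟩ := List.getElem?_eq_some_iff.mp hat
      have hge : j ≤ m.toNat := by
        by_contra hlt
        exact hmin m.toNat (by omega) (heq ▸ hcP)
      have : m = (j : Int) := by omega
      simp [this]

-- ===== VERDICT (by name: the statement is the Claim_ definition above) =====
theorem num_pos_spec : Claim_equal_num_pos := by
  intro stt _
  unfold Spec_num_pos num_pos
  rw [numPosGo_eq, numPosAlt_eq]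
  cases List.findIdx? nucP stt.toList <;> simp
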